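-- pv_equiv track=rewrite | github.com/grapheneaffiliate/h4-polytopic-attention | solve_arc_b12.py | solve_810b9b61
-- ===== SOURCE A (Python) =====
-- def solve_810b9b61(grid):
--     rows = len(grid)
--     cols = len(grid[0])
--     out = [row[:] for row in grid]
--
--     # Find connected components of 1s
--     visited = [[False]*cols for _ in range(rows)]
--
--     def bfs(r, c):
--         queue = [(r, c)]
--         visited[r][c] = True
--         cells = set()
--         cells.add((r, c))
--         idx = 0
--         while idx < len(queue):
--             cr, cc = queue[idx]
--             idx += 1
--             for dr, dc in [(-1,0),(1,0),(0,-1),(0,1)]: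
--                 nr, nc = cr+dr, cc+dc
--                 if 0 <= nr < rows and 0 <= nc < cols and not visited[nr][nc] and grid[nr][nc] == 1:
--                     visited[nr][nc] = True
--                     queue.append((nr, nc))
--                     cells.add((nr, nc))
--         return cells
--
--     components = []
--     for r in range(rows):
--         for c in range(cols):
--             if grid[r][c] == 1 and not visited[r][c]:
--                 cells = bfs(r, c)
--                 components.append(cells)
--
--     # Check if component forms a complete rectangle border with interior
--     for cells in components:
--         min_r = min(r for r, c in cells)
--         max_r = max(r for r, c in cells)
--         min_c = min(c for r, c in cells)
--         max_c = max(c for r, c in cells)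
--
--         # Must have at least 3x3 bounding box to have an interior
--         if max_r - min_r < 2 or max_c - min_c < 2:
--             continue
--
--         # A complete rectangle border: all cells on the border of the bounding box
--         border = set()
--         for r in range(min_r, max_r+1):
--             for c in range(min_c, max_c+1):
--                 if r == min_r or r == max_r or c == min_c or c == max_c:
--                     border.add((r, c))
--
--         if cells == border:
--             # It's a complete rectangle border - color it 3
--             for r, c in cells:
--                 out[r][c] = 3
--
--     return out
-- ===== SOURCE B (Python) =====
-- def _border_cells(r1, r2, c1, c2):
--     cells = [(r1, c) for c in range(c1, c2 + 1)]
--     cells += [(r2, c) for c in range(c1, c2 + 1)]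
--     for r in range(r1 + 1, r2):
--         cells.append((r, c1))
--         cells.append((r, c2))
--     return cells
--
--
-- def _on_border(r1, r2, c1, c2, r, c):
--     return r1 <= r <= r2 and c1 <= c <= c2 and (r == r1 or r == r2 or c == c1 or c == c2)
--
--
-- def _good_border(grid, rows, cols, r1, r2, c1, c2):
--     # every border cell is 1, and no 1-cell outside the border touches it
--     for (r, c) in _border_cells(r1, r2, c1, c2):
--         if grid[r][c] != 1:
--             return False
--         for dr, dc in ((-1, 0), (1, 0), (0, -1), (0, 1)):
--             nr, nc = r + dr, c + dc
--             if 0 <= nr < rows and 0 <= nc < cols and grid[nr][nc] == 1 \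
--                     and not _on_border(r1, r2, c1, c2, nr, nc):
--                 return False
--     return True
--
--
-- def solve_810b9b61(grid):
--     rows = len(grid)
--     cols = len(grid[0])
--     out = [row[:] for row in grid]
--     for r1 in range(rows):
--         for r2 in range(r1 + 2, rows):
--             for c1 in range(cols):
--                 for c2 in range(c1 + 2, cols):
--                     if _good_border(grid, rows, cols, r1, r2, c1, c2):
--                         for (r, c) in _border_cells(r1, r2, c1, c2):
--                             out[r][c] = 3
--     return out
-- ===== Notes on version B (the rewrite author's own statement) =====
-- stated objective: alternative
-- what changed: Replaces BFS connected-component discovery (queue, visited matrix, per-component bbox/border-set comparison) with direct enumeration of candidate rectangles, each tested by a local condition (border cells all 1 and no outside 1-cell adjacent to the border); no component structure is ever built.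
import Mathlib
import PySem

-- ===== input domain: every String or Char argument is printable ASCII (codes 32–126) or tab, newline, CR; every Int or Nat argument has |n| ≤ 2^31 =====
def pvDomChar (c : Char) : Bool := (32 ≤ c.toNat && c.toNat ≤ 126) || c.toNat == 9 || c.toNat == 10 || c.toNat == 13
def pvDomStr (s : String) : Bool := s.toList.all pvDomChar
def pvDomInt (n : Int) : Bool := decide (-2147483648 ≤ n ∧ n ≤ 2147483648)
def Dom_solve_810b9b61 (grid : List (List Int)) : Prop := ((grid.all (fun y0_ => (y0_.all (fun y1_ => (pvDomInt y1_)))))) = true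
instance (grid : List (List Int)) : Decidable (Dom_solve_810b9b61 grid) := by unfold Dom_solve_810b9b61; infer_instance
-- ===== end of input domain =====

-- B replaces A's BFS component search by direct enumeration of candidate rectangles with a
-- local border test (alternative algorithm, not claimed faster); equal output proved on Pre_.

-- shared cell accessor: grid[r][c] (exact wherever Python does not raise, i.e. inside Pre_)
def pvAt (g : List (List Int)) (r c : Int) : Int := (g.getD r.toNat []).getD c.toNat 0

-- ===== PORT A =====
def pvDirs : List (Int × Int) := [(-1, 0), (1, 0), (0, -1), (0, 1)]

def pvBfsStep (g : List (List Int)) (rows cols cr cc : Int)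
    (st : List (Int × Int) × ((Int × Int) → Bool) × PySem.Set (Int × Int)) (d : Int × Int) :
    List (Int × Int) × ((Int × Int) → Bool) × PySem.Set (Int × Int) :=
  if 0 ≤ cr + d.1 ∧ cr + d.1 < rows ∧ 0 ≤ cc + d.2 ∧ cc + d.2 < cols ∧
      st.2.1 (cr + d.1, cc + d.2) = false ∧ pvAt g (cr + d.1) (cc + d.2) = 1 then
    (st.1 ++ [(cr + d.1, cc + d.2)], fun p => if p = (cr + d.1, cc + d.2) then true else st.2.1 p,
      PySem.Set.add st.2.2 (cr + d.1, cc + d.2))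
  else st

-- number of in-bounds unvisited cells (termination measure of the BFS loop only)
def pvUnvis (rows cols : Int) (v : (Int × Int) → Bool) : Nat :=
  ((Finset.range rows.toNat ×ˢ Finset.range cols.toNat).filter
    (fun rc => v ((rc.1 : Int), (rc.2 : Int)) = false)).card

theorem pvBfsStep_sum (g : List (List Int)) (rows cols cr cc : Int)
    (st : List (Int × Int) × ((Int × Int) → Bool) × PySem.Set (Int × Int)) (d : Int × Int) :
    (pvBfsStep g rows cols cr cc st d).1.length + pvUnvis rows cols (pvBfsStep g rows cols cr cc st d).2.1
      = st.1.length + pvUnvis rows cols st.2.1 ∧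
    st.1.length ≤ (pvBfsStep g rows cols cr cc st d).1.length := by
  unfold pvBfsStep
  split
  · rename_i hcond
    obtain ⟨h1, h2, h3, h4, h5, h6⟩ := hcond
    simp only [List.length_append, List.length_cons, List.length_nil]
    constructor
    · have hx : ((cr + d.1).toNat, (cc + d.2).toNat) ∈
        (Finset.range rows.toNat ×ˢ Finset.range cols.toNat).filter
          (fun rc => st.2.1 ((rc.1 : Int), (rc.2 : Int)) = false) := by
        simp only [Finset.mem_filter, Finset.mem_product, Finset.mem_range]
        refine ⟨⟨by omega, by omega⟩, ?_⟩
        have : (((cr + d.1).toNat : Int), ((cc + d.2).toNat : Int)) = (cr + d.1, cc + d.2) := by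
          simp only [Prod.mk.injEq]; omega
        rw [this]; exact h5
      have herase : (Finset.range rows.toNat ×ˢ Finset.range cols.toNat).filter
          (fun rc => (if ((rc.1 : Int), (rc.2 : Int)) = (cr + d.1, cc + d.2) then true
            else st.2.1 ((rc.1 : Int), (rc.2 : Int))) = false)
          = ((Finset.range rows.toNat ×ˢ Finset.range cols.toNat).filter
            (fun rc => st.2.1 ((rc.1 : Int), (rc.2 : Int)) = false)).erase
              ((cr + d.1).toNat, (cc + d.2).toNat) := by
        ext rc
        simp only [Finset.mem_filter, Finset.mem_erase, Finset.mem_product, Finset.mem_range]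
        constructor
        · rintro ⟨⟨ha, hb⟩, hc⟩
          split at hc
          · simp at hc
          · rename_i hne
            refine ⟨?_, ⟨ha, hb⟩, hc⟩
            intro he; apply hne
            rw [he]; simp only [Prod.mk.injEq]; omega
        · rintro ⟨hne, ⟨ha, hb⟩, hc⟩
          refine ⟨⟨ha, hb⟩, ?_⟩
          split
          · rename_i he
            exfalso; apply hne
            have : rc.1 = (cr + d.1).toNat ∧ rc.2 = (cc + d.2).toNat := by
              have e1 : (rc.1 : Int) = cr + d.1 := by
                have := congrArg Prod.fst he; simpa using this
              have e2 : (rc.2 : Int) = cc + d.2 := by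
                have := congrArg Prod.snd he; simpa using this
              omega
            cases rc; simp_all
          · exact hc
      unfold pvUnvis
      simp only
      rw [herase, Finset.card_erase_of_mem hx]
      have hpos : 0 < ((Finset.range rows.toNat ×ˢ Finset.range cols.toNat).filter
          (fun rc => st.2.1 ((rc.1 : Int), (rc.2 : Int)) = false)).card :=
        Finset.card_pos.mpr ⟨_, hx⟩
      omega
    · omega
  · exact ⟨rfl, le_refl _⟩

theorem pvBfsFold_sum (g : List (List Int)) (rows cols cr cc : Int) (ds : List (Int × Int)) :
    ∀ st : List (Int × Int) × ((Int × Int) → Bool) × PySem.Set (Int × Int),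
    (ds.foldl (pvBfsStep g rows cols cr cc) st).1.length
        + pvUnvis rows cols (ds.foldl (pvBfsStep g rows cols cr cc) st).2.1
      = st.1.length + pvUnvis rows cols st.2.1 ∧
    st.1.length ≤ (ds.foldl (pvBfsStep g rows cols cr cc) st).1.length := by
  induction ds with
  | nil => intro st; exact ⟨rfl, le_refl _⟩
  | cons d ds ih =>
    intro st
    have h1 := pvBfsStep_sum g rows cols cr cc st d
    have h2 := ih (pvBfsStep g rows cols cr cc st d)
    simp only [List.foldl_cons]
    omega

def pvBfsLoop (g : List (List Int)) (rows cols : Int) (queue : List (Int × Int)) (idx : Nat)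
    (visited : (Int × Int) → Bool) (cells : PySem.Set (Int × Int)) :
    PySem.Set (Int × Int) × ((Int × Int) → Bool) :=
  if h : idx < queue.length then
    let cr := (queue[idx]).1
    let cc := (queue[idx]).2
    let st := pvDirs.foldl (pvBfsStep g rows cols cr cc) (queue, visited, cells)
    pvBfsLoop g rows cols st.1 (idx + 1) st.2.1 st.2.2
  else (cells, visited)
termination_by queue.length - idx + pvUnvis rows cols visited
decreasing_by
  have := pvBfsFold_sum g rows cols (queue[idx]).1 (queue[idx]).2 pvDirs (queue, visited, cells)
  simp only at this ⊢
  omega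

def pvBfs (g : List (List Int)) (rows cols r c : Int) (visited : (Int × Int) → Bool) :
    PySem.Set (Int × Int) × ((Int × Int) → Bool) :=
  pvBfsLoop g rows cols [(r, c)] 0 (fun p => if p = (r, c) then true else visited p)
    (PySem.Set.add PySem.Set.empty (r, c))

def pvScanStep (g : List (List Int)) (rows cols : Int)
    (st : ((Int × Int) → Bool) × List (PySem.Set (Int × Int))) (p : Int × Int) :
    ((Int × Int) → Bool) × List (PySem.Set (Int × Int)) :=
  if pvAt g p.1 p.2 = 1 ∧ st.1 p = false then
    let res := pvBfs g rows cols p.1 p.2 st.1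
    (res.2, st.2 ++ [res.1])
  else st

def pvBorderA (minr maxr minc maxc : Int) : PySem.Set (Int × Int) :=
  (PySem.List.pyRange minr (maxr + 1) 1).foldl (fun b r =>
    (PySem.List.pyRange minc (maxc + 1) 1).foldl (fun b c =>
      if r = minr ∨ r = maxr ∨ c = minc ∨ c = maxc then PySem.Set.add b (r, c) else b) b)
    PySem.Set.empty

def pvRecolorStep (out : List (List Int)) (cells : PySem.Set (Int × Int)) : List (List Int) :=
  let minr : Int := ((cells.map (fun p => p.1)).min?).getD 0
  let maxr : Int := ((cells.map (fun p => p.1)).max?).getD 0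
  let minc : Int := ((cells.map (fun p => p.2)).min?).getD 0
  let maxc : Int := ((cells.map (fun p => p.2)).max?).getD 0
  if maxr - minr < 2 ∨ maxc - minc < 2 then out
  else
    let border := pvBorderA minr maxr minc maxc
    if PySem.Set.equal cells border then
      cells.foldl (fun o p => o.set p.1.toNat ((o.getD p.1.toNat []).set p.2.toNat 3)) out
    else out

def solve_810b9b61 (grid : List (List Int)) : List (List Int) :=
  let rows : Int := (grid.length : Int)
  let cols : Int := ((grid.getD 0 []).length : Int)
  let components := ((PySem.List.pyRange 0 rows 1).flatMap (fun r =>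
      (PySem.List.pyRange 0 cols 1).map (fun c => (r, c)))).foldl
    (pvScanStep grid rows cols) ((fun _ => false), [])
  components.2.foldl pvRecolorStep grid

-- ===== PORT B =====
def pvDirsB : List (Int × Int) := [(-1, 0), (1, 0), (0, -1), (0, 1)]

def pvBorderB (r1 r2 c1 c2 : Int) : List (Int × Int) :=
  ((PySem.List.pyRange c1 (c2 + 1) 1).map (fun c => (r1, c)))
    ++ ((PySem.List.pyRange c1 (c2 + 1) 1).map (fun c => (r2, c)))
    ++ ((PySem.List.pyRange (r1 + 1) r2 1).flatMap (fun r => [(r, c1), (r, c2)]))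

def pvOnBorder (r1 r2 c1 c2 r c : Int) : Bool :=
  decide (r1 ≤ r ∧ r ≤ r2 ∧ c1 ≤ c ∧ c ≤ c2 ∧ (r = r1 ∨ r = r2 ∨ c = c1 ∨ c = c2))

def pvGoodB (g : List (List Int)) (rows cols r1 r2 c1 c2 : Int) : Bool :=
  (pvBorderB r1 r2 c1 c2).all (fun p =>
    decide (pvAt g p.1 p.2 = 1) &&
    pvDirsB.all (fun d =>
      !(decide (0 ≤ p.1 + d.1 ∧ p.1 + d.1 < rows ∧ 0 ≤ p.2 + d.2 ∧ p.2 + d.2 < cols ∧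
          pvAt g (p.1 + d.1) (p.2 + d.2) = 1) &&
        !pvOnBorder r1 r2 c1 c2 (p.1 + d.1) (p.2 + d.2))))

def solve_810b9b61_alt (grid : List (List Int)) : List (List Int) :=
  let rows : Int := (grid.length : Int)
  let cols : Int := ((grid.getD 0 []).length : Int)
  let rects : List (Int × Int × Int × Int) :=
    (PySem.List.pyRange 0 rows 1).flatMap (fun r1 =>
      (PySem.List.pyRange (r1 + 2) rows 1).flatMap (fun r2 =>
        (PySem.List.pyRange 0 cols 1).flatMap (fun c1 =>
          (PySem.List.pyRange (c1 + 2) cols 1).map (fun c2 => (r1, r2, c1, c2)))))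
  rects.foldl (fun out t =>
    if pvGoodB grid rows cols t.1 t.2.1 t.2.2.1 t.2.2.2 then
      (pvBorderB t.1 t.2.1 t.2.2.1 t.2.2.2).foldl
        (fun o p => o.set p.1.toNat ((o.getD p.1.toNat []).set p.2.toNat 3)) out
    else out) grid

-- ===== PRECONDITION & SPEC =====
-- Pre_ = exactly the inputs where A returns: nonempty grid, every row at least as long as row 0
-- (an empty grid or a row shorter than row 0 makes A raise IndexError).
def Pre_solve_810b9b61 (grid : List (List Int)) : Prop :=
  grid ≠ [] ∧ ∀ row ∈ grid, (grid.headD []).length ≤ row.length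
instance (grid : List (List Int)) : Decidable (Pre_solve_810b9b61 grid) := by
  unfold Pre_solve_810b9b61; infer_instance

def pvWitness_solve_810b9b61 : List (List Int) := [[1,1,1],[1,0,1],[1,1,1]]

def Spec_solve_810b9b61 (grid : List (List Int)) (out : List (List Int)) : Prop :=
  out = solve_810b9b61_alt grid
instance (grid : List (List Int)) (out : List (List Int)) : Decidable (Spec_solve_810b9b61 grid out) := by
  unfold Spec_solve_810b9b61; infer_instance

-- ===== CLAIM (what is proved, stated in full; the proofs are below) =====
def Claim_equal_solve_810b9b61 : Prop := ∀ (grid : List (List Int)), Dom_solve_810b9b61 grid →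
  Pre_solve_810b9b61 grid → Spec_solve_810b9b61 grid (solve_810b9b61 grid)

-- ===== LEMMAS AND PROOFS =====

-- semantic layer: cells, adjacency, reachability, rectangle borders
def pvRows (g : List (List Int)) : Int := (g.length : Int)
def pvCols (g : List (List Int)) : Int := ((g.getD 0 []).length : Int)
def pvOne (g : List (List Int)) (p : Int × Int) : Prop :=
  0 ≤ p.1 ∧ p.1 < pvRows g ∧ 0 ≤ p.2 ∧ p.2 < pvCols g ∧ pvAt g p.1 p.2 = 1
def pvAdj (g : List (List Int)) (p q : Int × Int) : Prop :=
  pvOne g p ∧ pvOne g q ∧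
    ((q.1 = p.1 - 1 ∧ q.2 = p.2) ∨ (q.1 = p.1 + 1 ∧ q.2 = p.2) ∨
     (q.1 = p.1 ∧ q.2 = p.2 - 1) ∨ (q.1 = p.1 ∧ q.2 = p.2 + 1))
def pvReach (g : List (List Int)) : (Int × Int) → (Int × Int) → Prop :=
  Relation.ReflTransGen (pvAdj g)
def pvBorderP (r1 r2 c1 c2 : Int) (p : Int × Int) : Prop :=
  r1 ≤ p.1 ∧ p.1 ≤ r2 ∧ c1 ≤ p.2 ∧ p.2 ≤ c2 ∧ (p.1 = r1 ∨ p.1 = r2 ∨ p.2 = c1 ∨ p.2 = c2)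
def pvGoodRect (g : List (List Int)) (r1 r2 c1 c2 : Int) : Prop :=
  r1 + 2 ≤ r2 ∧ c1 + 2 ≤ c2 ∧ (∀ p, pvBorderP r1 r2 c1 c2 p → pvOne g p) ∧
    (∀ p q, pvBorderP r1 r2 c1 c2 p → pvAdj g p q → pvBorderP r1 r2 c1 c2 q)
def pvMark (g : List (List Int)) (p : Int × Int) : Prop :=
  ∃ r1 r2 c1 c2, pvGoodRect g r1 r2 c1 c2 ∧ pvBorderP r1 r2 c1 c2 p

theorem pvAdj_symm (g : List (List Int)) {p q : Int × Int} (h : pvAdj g p q) : pvAdj g q p := by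
  obtain ⟨h1, h2, h3⟩ := h
  exact ⟨h2, h1, by omega⟩

theorem pvReach_symm (g : List (List Int)) {p q : Int × Int} (h : pvReach g p q) :
    pvReach g q p := by
  induction h with
  | refl => exact Relation.ReflTransGen.refl
  | tail _ hadj ih => exact Relation.ReflTransGen.head (pvAdj_symm g hadj) ih

theorem pvReach_one (g : List (List Int)) {p q : Int × Int} (hp : pvOne g p)
    (h : pvReach g p q) : pvOne g q := by
  induction h with
  | refl => exact hp
  | tail _ hadj _ => exact hadj.2.1

theorem pvReach_trans (g : List (List Int)) {p q r : Int × Int} (h1 : pvReach g p q)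
    (h2 : pvReach g q r) : pvReach g p r := Relation.ReflTransGen.trans h1 h2

-- queue/visited/cells sync invariant of the BFS inner fold
def pvQInv (g : List (List Int)) (v0 : (Int × Int) → Bool) (s : Int × Int)
    (st : List (Int × Int) × ((Int × Int) → Bool) × PySem.Set (Int × Int)) : Prop :=
  st.2.2 = st.1 ∧ (∀ p, st.2.1 p = (v0 p || st.1.contains p)) ∧ (∀ p ∈ st.1, pvReach g s p)

theorem pvAdj_dir (g : List (List Int)) {p q : Int × Int} (h : pvAdj g p q) :
    ∃ d ∈ pvDirs, q = (p.1 + d.1, p.2 + d.2) := by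
  obtain ⟨_, _, h3⟩ := h
  rcases h3 with ⟨h, h'⟩ | ⟨h, h'⟩ | ⟨h, h'⟩ | ⟨h, h'⟩
  · exact ⟨(-1, 0), by simp [pvDirs], by ext <;> simp <;> omega⟩
  · exact ⟨(1, 0), by simp [pvDirs], by ext <;> simp <;> omega⟩
  · exact ⟨(0, -1), by simp [pvDirs], by ext <;> simp <;> omega⟩
  · exact ⟨(0, 1), by simp [pvDirs], by ext <;> simp <;> omega⟩

theorem pvStep_q (g : List (List Int)) (v0 : (Int × Int) → Bool) (s : Int × Int)
    (rows cols : Int) (hr : rows = pvRows g) (hc : cols = pvCols g)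
    (hone : pvOne g s) (c : Int × Int) (hcq : pvReach g s c) (d : Int × Int) (hd : d ∈ pvDirs)
    (st : List (Int × Int) × ((Int × Int) → Bool) × PySem.Set (Int × Int))
    (h : pvQInv g v0 s st) :
    pvQInv g v0 s (pvBfsStep g rows cols c.1 c.2 st d) ∧
    (∃ ext, (pvBfsStep g rows cols c.1 c.2 st d).1 = st.1 ++ ext) ∧
    (pvOne g (c.1 + d.1, c.2 + d.2) →
      (pvBfsStep g rows cols c.1 c.2 st d).2.1 (c.1 + d.1, c.2 + d.2) = true) := by
  obtain ⟨hsync, hvis, hreach⟩ := h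
  unfold pvBfsStep
  split
  · rename_i hcond
    obtain ⟨h1, h2, h3, h4, h5, h6⟩ := hcond
    have hnotmem : (c.1 + d.1, c.2 + d.2) ∉ st.1 := by
      intro hmem
      have := hvis (c.1 + d.1, c.2 + d.2)
      rw [h5] at this
      simp only [List.contains_eq_mem, hmem, decide_true, Bool.or_true] at this
      exact absurd this.symm (by simp)
    have hadj : pvAdj g c (c.1 + d.1, c.2 + d.2) := by
      refine ⟨pvReach_one g hone hcq, ⟨by simpa using h1, by rw [← hr]; simpa using h2,
        by simpa using h3, by rw [← hc]; simpa using h4, by simpa using h6⟩, ?_⟩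
      simp only [pvDirs, List.mem_cons, List.not_mem_nil] at hd
      rcases hd with h | h | h | h | h
      · subst h; simp; omega
      · subst h; simp
      · subst h; simp; omega
      · subst h; simp
      · cases h
    refine ⟨⟨?_, ?_, ?_⟩, ⟨[(c.1 + d.1, c.2 + d.2)], rfl⟩, ?_⟩
    · rw [hsync]
      exact PySem.Set.add_of_not_mem hnotmem
    · intro p
      by_cases hp : p = (c.1 + d.1, c.2 + d.2)
      · subst hp
        simp [List.contains_eq_mem]
      · show (if p = (c.1 + d.1, c.2 + d.2) then true else st.2.1 p) = _
        rw [if_neg hp, hvis p]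
        simp [List.contains_eq_mem, hp]
    · intro p hp
      rcases List.mem_append.mp hp with hp | hp
      · exact hreach p hp
      · simp only [List.mem_singleton] at hp
        subst hp
        exact Relation.ReflTransGen.tail hcq hadj
    · intro _; simp
  · rename_i hcond
    refine ⟨⟨hsync, hvis, hreach⟩, ⟨[], by simp⟩, ?_⟩
    intro hone'
    obtain ⟨k1, k2, k3, k4, k5⟩ := hone'
    simp only [not_and_or] at hcond
    have hvtrue : st.2.1 (c.1 + d.1, c.2 + d.2) ≠ false := by
      rcases hcond with h | h | h | h | h | h
      · exact absurd k1 (by simpa using h)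
      · exact absurd k2 (by rw [hr] at h; simpa using h)
      · exact absurd k3 (by simpa using h)
      · exact absurd k4 (by rw [hc] at h; simpa using h)
      · exact h
      · exact absurd k5 (by simpa using h)
    simpa using hvtrue

theorem pvVis_mono (g : List (List Int)) (v0 : (Int × Int) → Bool) (s : Int × Int)
    (st st' : List (Int × Int) × ((Int × Int) → Bool) × PySem.Set (Int × Int))
    (h : pvQInv g v0 s st) (h' : pvQInv g v0 s st') (hext : ∃ ext, st'.1 = st.1 ++ ext)
    {p : Int × Int} (hp : st.2.1 p = true) : st'.2.1 p = true := by
  obtain ⟨ext, hext⟩ := hext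
  rw [h.2.1 p] at hp
  rw [h'.2.1 p, hext]
  rcases Bool.or_eq_true_iff.mp hp with hv | hm
  · simp [hv]
  · simp only [List.contains_eq_mem, decide_eq_true_eq] at hm
    simp [List.contains_eq_mem, List.mem_append, hm]

theorem pvFold_q (g : List (List Int)) (v0 : (Int × Int) → Bool) (s : Int × Int)
    (rows cols : Int) (hr : rows = pvRows g) (hc : cols = pvCols g)
    (hone : pvOne g s) (c : Int × Int) (hcq : pvReach g s c) (ds : List (Int × Int))
    (hds : ∀ d ∈ ds, d ∈ pvDirs) :
    ∀ st, pvQInv g v0 s st →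
    pvQInv g v0 s (ds.foldl (pvBfsStep g rows cols c.1 c.2) st) ∧
    (∃ ext, (ds.foldl (pvBfsStep g rows cols c.1 c.2) st).1 = st.1 ++ ext) ∧
    (∀ d ∈ ds, pvOne g (c.1 + d.1, c.2 + d.2) →
      (ds.foldl (pvBfsStep g rows cols c.1 c.2) st).2.1 (c.1 + d.1, c.2 + d.2) = true) := by
  induction ds with
  | nil => intro st h; exact ⟨h, ⟨[], by simp⟩, by simp⟩
  | cons d ds ih =>
    intro st h
    have hstep := pvStep_q g v0 s rows cols hr hc hone c hcq d (hds d (by simp)) st h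
    have hrec := ih (fun d hd => hds d (by simp [hd])) _ hstep.1
    refine ⟨hrec.1, ?_, ?_⟩
    · obtain ⟨e1, he1⟩ := hstep.2.1
      obtain ⟨e2, he2⟩ := hrec.2.1
      exact ⟨e1 ++ e2, by simp only [List.foldl_cons] at *; rw [he2, he1, List.append_assoc]⟩
    · intro d' hd' hone'
      simp only [List.foldl_cons]
      rcases List.mem_cons.mp hd' with hd' | hd'
      · subst hd'
        exact pvVis_mono g v0 s _ _ hstep.1 hrec.1 hrec.2.1 (hstep.2.2 hone')
      · exact hrec.2.2 d' hd' hone'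
def pvLInv (g : List (List Int)) (v0 : (Int × Int) → Bool) (s : Int × Int)
    (queue : List (Int × Int)) (idx : Nat) (visited : (Int × Int) → Bool)
    (cells : PySem.Set (Int × Int)) : Prop :=
  pvQInv g v0 s (queue, visited, cells) ∧ idx ≤ queue.length ∧ s ∈ queue ∧
  (∀ (j : Nat) (hj : j < queue.length), j < idx → ∀ q, pvAdj g queue[j] q → visited q = true)

theorem pvLoop_spec (g : List (List Int)) (v0 : (Int × Int) → Bool) (s : Int × Int)
    (rows cols : Int) (hr : rows = pvRows g) (hc : cols = pvCols g) (hone : pvOne g s) :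
    ∀ queue idx visited cells, pvLInv g v0 s queue idx visited cells →
    ∃ qf vf, pvBfsLoop g rows cols queue idx visited cells = (qf, vf) ∧
      (∀ p, vf p = (v0 p || qf.contains p)) ∧ s ∈ qf ∧ (∀ p ∈ queue, p ∈ qf) ∧
      (∀ p ∈ qf, pvReach g s p) ∧ (∀ p ∈ qf, ∀ q, pvAdj g p q → vf q = true) := by
  intro queue idx visited cells
  induction queue, idx, visited, cells using pvBfsLoop.induct g rows cols with
  | case1 queue idx visited cells h cr cc stl ih =>
    intro hinv
    obtain ⟨hq, hidx, hs, hproc⟩ := hinv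
    have hcmem : queue[idx] ∈ queue := List.getElem_mem h
    have hcq : pvReach g s queue[idx] := hq.2.2 _ hcmem
    have hfold := pvFold_q g v0 s rows cols hr hc hone queue[idx] hcq pvDirs
      (fun d hd => hd) (queue, visited, cells) hq
    set st := pvDirs.foldl (pvBfsStep g rows cols queue[idx].1 queue[idx].2)
      (queue, visited, cells) with hst
    obtain ⟨hq', ⟨ext, hext⟩, hpost⟩ := hfold
    have hq'3 : st.1 = queue ++ ext := by simpa using hext
    have hinv' : pvLInv g v0 s st.1 (idx + 1) st.2.1 st.2.2 := by
      refine ⟨by simpa using hq', ?_, ?_, ?_⟩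
      · rw [hq'3]; simp only [List.length_append]; omega
      · rw [hq'3]; exact List.mem_append_left _ hs
      · intro j hj hji q hadj
        by_cases hjidx : j < idx
        · -- old element: use hproc and monotonicity of visited
          have hjq : j < queue.length := by omega
          have hgj : st.1[j]'hj = queue[j]'hjq := by
            simp only [hq'3]
            exact List.getElem_append_left hjq
          rw [hgj] at hadj
          have hvd := hproc j hjq hjidx q hadj
          exact pvVis_mono g v0 s (queue, visited, cells) st hq hq' ⟨ext, hext⟩ hvd
        · have hj' : j = idx := by omega
          subst hj'
          have hgj : st.1[j]'hj = queue[j]'h := by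
            simp only [hq'3]
            exact List.getElem_append_left h
          rw [hgj] at hadj
          obtain ⟨d, hd, hqd⟩ := pvAdj_dir g hadj
          subst hqd
          exact hpost d hd hadj.2.1
    have := ih hinv'
    obtain ⟨qf, vf, heq, hrest⟩ := this
    refine ⟨qf, vf, ?_, hrest.1, hrest.2.1, ?_, hrest.2.2.2⟩
    · rw [pvBfsLoop]
      simp only [dif_pos h]
      exact heq
    · intro p hp
      exact hrest.2.2.1 p (by rw [hq'3]; exact List.mem_append_left _ hp)
  | case2 queue idx visited cells h =>
    intro hinv
    obtain ⟨hq, hidx, hs, hproc⟩ := hinv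
    refine ⟨queue, visited, ?_, hq.2.1, hs, fun p hp => hp, hq.2.2, ?_⟩
    · rw [pvBfsLoop]
      simp only [dif_neg h]
      have hcq : cells = queue := hq.1
      rw [hcq]
    · intro p hp q hadj
      obtain ⟨j, hj, hgj⟩ := List.mem_iff_getElem.mp hp
      rw [← hgj] at hadj
      exact hproc j hj (by omega) q hadj

theorem pvReach_not_v0 (g : List (List Int)) (v0 : (Int × Int) → Bool) {s p : Int × Int}
    (hv0 : v0 s = false) (hcl : ∀ p q, v0 p = true → pvAdj g p q → v0 q = true)
    (h : pvReach g s p) : v0 p = false := by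
  induction h with
  | refl => exact hv0
  | tail _ hadj ih =>
    rename_i q r _
    by_contra hq
    have : v0 r = true := by revert hq; cases v0 r <;> simp
    exact absurd (hcl r q this (pvAdj_symm g hadj)) (by simp [ih])

theorem pvBfs_correct (g : List (List Int)) (v0 : (Int × Int) → Bool) (s : Int × Int)
    (rows cols : Int) (hr : rows = pvRows g) (hc : cols = pvCols g)
    (hone : pvOne g s) (hv0 : v0 s = false)
    (hcl : ∀ p q, v0 p = true → pvAdj g p q → v0 q = true) :
    ∃ qf vf, pvBfs g rows cols s.1 s.2 v0 = (qf, vf) ∧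
      (∀ p, p ∈ qf ↔ pvReach g s p) ∧
      (∀ p, vf p = true ↔ (v0 p = true ∨ pvReach g s p)) := by
  have hseta : (s.1, s.2) = s := rfl
  have hinit : pvLInv g v0 s [(s.1, s.2)] 0
      (fun p => if p = (s.1, s.2) then true else v0 p)
      (PySem.Set.add PySem.Set.empty (s.1, s.2)) := by
    refine ⟨⟨?_, ?_, ?_⟩, by simp, by simp [hseta], ?_⟩
    · show PySem.Set.add PySem.Set.empty (s.1, s.2) = [(s.1, s.2)]
      exact PySem.Set.add_of_not_mem (List.not_mem_nil)
    · intro p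
      by_cases hp : p = (s.1, s.2)
      · subst hp; simp [List.contains_eq_mem]
      · show (if p = (s.1, s.2) then true else v0 p) = _
        rw [if_neg hp]
        simp [List.contains_eq_mem, hp]
    · intro p hp
      simp only [List.mem_singleton] at hp
      subst hp
      exact Relation.ReflTransGen.refl
    · intro j hj hj0; omega
  obtain ⟨qf, vf, heq, hvf, hsf, _, hreachf, hclf⟩ :=
    pvLoop_spec g v0 s rows cols hr hc hone _ 0 _ _ hinit
  have hmem : ∀ p, p ∈ qf ↔ pvReach g s p := by
    intro p
    constructor
    · exact hreachf p
    · intro hre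
      induction hre with
      | refl => exact hsf
      | tail hpre hadj ih =>
        rename_i q r
        have hvr := hclf q ih r hadj
        rw [hvf r] at hvr
        rcases Bool.or_eq_true_iff.mp hvr with hv | hm
        · exact absurd hv (by
            simp [pvReach_not_v0 g v0 hv0 hcl (Relation.ReflTransGen.tail hpre hadj)])
        · simpa [List.contains_eq_mem] using hm
  refine ⟨qf, vf, by rw [pvBfs]; exact heq, hmem, ?_⟩
  intro p
  rw [hvf p]
  constructor
  · intro hv
    rcases Bool.or_eq_true_iff.mp hv with hv | hm
    · exact Or.inl hv
    · exact Or.inr ((hmem p).mp (by simpa [List.contains_eq_mem] using hm))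
  · intro hv
    rcases hv with hv | hre
    · simp [hv]
    · simp [List.contains_eq_mem, (hmem p).mpr hre]
-- invariant of the outer scan: every collected set is a component, visited = union of them
def pvSInv (g : List (List Int))
    (st : ((Int × Int) → Bool) × List (PySem.Set (Int × Int))) : Prop :=
  (∀ cl ∈ st.2, ∃ s, pvOne g s ∧ ∀ p, p ∈ cl ↔ pvReach g s p) ∧
  (∀ q, st.1 q = true ↔ ∃ cl ∈ st.2, q ∈ cl)

theorem pvSInv_closed (g : List (List Int))
    (st : ((Int × Int) → Bool) × List (PySem.Set (Int × Int))) (h : pvSInv g st) :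
    ∀ p q, st.1 p = true → pvAdj g p q → st.1 q = true := by
  intro p q hp hadj
  obtain ⟨cl, hcl, hpcl⟩ := (h.2 p).mp hp
  obtain ⟨s, hones, hchar⟩ := h.1 cl hcl
  have hrs : pvReach g s q :=
    Relation.ReflTransGen.tail ((hchar p).mp hpcl) hadj
  exact (h.2 q).mpr ⟨cl, hcl, (hchar q).mpr hrs⟩

theorem pvScan_fold (g : List (List Int)) (rows cols : Int)
    (hr : rows = pvRows g) (hc : cols = pvCols g) :
    ∀ (l : List (Int × Int)),
    (∀ p ∈ l, 0 ≤ p.1 ∧ p.1 < pvRows g ∧ 0 ≤ p.2 ∧ p.2 < pvCols g) →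
    ∀ st, pvSInv g st →
    pvSInv g (l.foldl (pvScanStep g rows cols) st) ∧
    (∀ q, st.1 q = true → (l.foldl (pvScanStep g rows cols) st).1 q = true) ∧
    (∀ p ∈ l, pvOne g p → (l.foldl (pvScanStep g rows cols) st).1 p = true) := by
  intro l
  induction l with
  | nil => intro _ st h; exact ⟨h, fun q hq => hq, by simp⟩
  | cons p l ihl =>
    intro hl st h
    have hpb := hl p (by simp)
    have hstep : pvSInv g (pvScanStep g rows cols st p) ∧
        (∀ q, st.1 q = true → (pvScanStep g rows cols st p).1 q = true) ∧
        (pvOne g p → (pvScanStep g rows cols st p).1 p = true) := by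
      unfold pvScanStep
      split
      · rename_i hcond
        obtain ⟨hval, hvisf⟩ := hcond
        have honep : pvOne g p := ⟨hpb.1, hpb.2.1, hpb.2.2.1, hpb.2.2.2, hval⟩
        obtain ⟨qf, vf, heq, hmem, hvf⟩ :=
          pvBfs_correct g st.1 p rows cols hr hc honep hvisf (pvSInv_closed g st h)
        rw [heq]
        refine ⟨⟨?_, ?_⟩, ?_, ?_⟩
        · intro cl hcl
          simp only [List.mem_append, List.mem_singleton] at hcl
          rcases hcl with hcl | hcl
          · exact h.1 cl hcl
          · subst hcl; exact ⟨p, honep, hmem⟩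
        · intro q
          simp only
          rw [hvf q]
          constructor
          · rintro (hv | hre)
            · obtain ⟨cl, hcl, hq⟩ := (h.2 q).mp hv
              exact ⟨cl, by simp [hcl], hq⟩
            · exact ⟨qf, by simp, (hmem q).mpr hre⟩
          · rintro ⟨cl, hcl, hq⟩
            simp only [List.mem_append, List.mem_singleton] at hcl
            rcases hcl with hcl | hcl
            · exact Or.inl ((h.2 q).mpr ⟨cl, hcl, hq⟩)
            · subst hcl; exact Or.inr ((hmem q).mp hq)
        · intro q hq
          simp only
          rw [hvf q]
          exact Or.inl hq
        · intro _
          simp only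
          rw [hvf p]
          exact Or.inr Relation.ReflTransGen.refl
      · rename_i hcond
        refine ⟨h, fun q hq => hq, ?_⟩
        intro honep
        rcases not_and_or.mp hcond with hv | hv
        · exact absurd honep.2.2.2.2 hv
        · revert hv; cases hvp : st.1 p <;> simp
    have hrec := ihl (fun q hq => hl q (by simp [hq])) _ hstep.1
    refine ⟨hrec.1, ?_, ?_⟩
    · intro q hq
      simp only [List.foldl_cons]
      exact hrec.2.1 q (hstep.2.1 q hq)
    · intro q hq honeq
      simp only [List.foldl_cons]
      rcases List.mem_cons.mp hq with hq | hq
      · subst hq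
        exact hrec.2.1 q (hstep.2.2 honeq)
      · exact hrec.2.2 q hq honeq

theorem pvMem_allCells (rows cols : Int) (q : Int × Int) :
    q ∈ (PySem.List.pyRange 0 rows 1).flatMap (fun r =>
      (PySem.List.pyRange 0 cols 1).map (fun c => (r, c))) ↔
    0 ≤ q.1 ∧ q.1 < rows ∧ 0 ≤ q.2 ∧ q.2 < cols := by
  simp only [List.mem_flatMap, List.mem_map, PySem.List.mem_pyRange_one]
  constructor
  · rintro ⟨r, ⟨hr0, hr1⟩, c, ⟨hc0, hc1⟩, hq⟩
    subst hq
    exact ⟨hr0, hr1, hc0, hc1⟩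
  · rintro ⟨h1, h2, h3, h4⟩
    exact ⟨q.1, ⟨h1, h2⟩, q.2, ⟨h3, h4⟩, rfl⟩
-- painting a list of in-bounds cells with 3: shape preserved, pointwise value
theorem pvPaint_shape (ps : List (Int × Int)) : ∀ (m : List (List Int)),
    ((ps.foldl (fun o p => o.set p.1.toNat ((o.getD p.1.toNat []).set p.2.toNat 3)) m).length
      = m.length) ∧
    (∀ i : Nat, ((ps.foldl (fun o p => o.set p.1.toNat ((o.getD p.1.toNat []).set p.2.toNat 3)) m).getD i []).length
      = (m.getD i []).length) := by
  induction ps with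
  | nil => intro m; exact ⟨rfl, fun _ => rfl⟩
  | cons p ps ih =>
    intro m
    have hstep1 : (m.set p.1.toNat ((m.getD p.1.toNat []).set p.2.toNat 3)).length = m.length :=
      List.length_set ..
    have hstep2 : ∀ i : Nat,
        ((m.set p.1.toNat ((m.getD p.1.toNat []).set p.2.toNat 3)).getD i []).length
          = (m.getD i []).length := by
      intro i
      by_cases hip : p.1.toNat = i
      · subst hip
        by_cases hlen : p.1.toNat < m.length
        · rw [List.getD_eq_getElem?_getD, List.getElem?_set_self (by omega),
            List.getD_eq_getElem?_getD]
          simp [List.getElem?_eq_getElem hlen]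
        · rw [List.set_eq_of_length_le (by omega)]
      · rw [List.getD_eq_getElem?_getD, List.getElem?_set_ne hip, ← List.getD_eq_getElem?_getD]
    have := ih (m.set p.1.toNat ((m.getD p.1.toNat []).set p.2.toNat 3))
    simp only [List.foldl_cons]
    exact ⟨this.1.trans hstep1, fun i => (this.2 i).trans (hstep2 i)⟩

theorem pvPaint_val (ps : List (Int × Int)) : ∀ (m : List (List Int)),
    (∀ p ∈ ps, 0 ≤ p.1 ∧ 0 ≤ p.2 ∧ p.1.toNat < m.length ∧ p.2.toNat < (m.getD p.1.toNat []).length) →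
    ∀ i j : Nat,
    ((((i : Int), (j : Int)) ∈ ps →
      pvAt (ps.foldl (fun o p => o.set p.1.toNat ((o.getD p.1.toNat []).set p.2.toNat 3)) m) i j = 3) ∧
     (((i : Int), (j : Int)) ∉ ps →
      pvAt (ps.foldl (fun o p => o.set p.1.toNat ((o.getD p.1.toNat []).set p.2.toNat 3)) m) i j
        = pvAt m i j)) := by
  induction ps with
  | nil => intro m _ i j; exact ⟨by simp, fun _ => rfl⟩
  | cons p ps ih =>
    intro m hb i j
    set m' := m.set p.1.toNat ((m.getD p.1.toNat []).set p.2.toNat 3) with hm'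
    have hbm : ∀ q ∈ ps, 0 ≤ q.1 ∧ 0 ≤ q.2 ∧ q.1.toNat < m'.length ∧ q.2.toNat < (m'.getD q.1.toNat []).length := by
      intro q hq
      have := hb q (by simp [hq])
      have hsh := pvPaint_shape [p] m
      refine ⟨this.1, this.2.1, ?_, ?_⟩
      · rw [hm', List.length_set]; exact this.2.2.1
      · have h2 : ∀ i : Nat, (m'.getD i []).length = (m.getD i []).length := by
          intro i
          have := (pvPaint_shape [p] m).2 i
          simpa using this
        rw [h2]; exact this.2.2.2
    have hpb := hb p (by simp)
    have hval_mp : pvAt m' p.1 p.2 = 3 := by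
      unfold pvAt
      rw [hm']
      simp only [List.getD_eq_getElem?_getD]
      rw [List.getElem?_set_self hpb.2.2.1]
      simp only [Option.getD_some]
      rw [List.getElem?_set_self (by
        have := hpb.2.2.2
        simpa [List.getD_eq_getElem?_getD] using this)]
      rfl
    have hval_ne : ∀ i j : Nat, ((i : Int), (j : Int)) ≠ p → pvAt m' i j = pvAt m i j := by
      intro i j hne
      unfold pvAt
      simp only [hm', List.getD_eq_getElem?_getD, Int.toNat_natCast]
      by_cases hip : p.1.toNat = i
      · have hp1 : p.1 = (i : Int) := by omega
        have hp2 : p.2 ≠ (j : Int) := by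
          intro hcon
          exact hne (by rw [← hp1, ← hcon])
        have hjp : p.2.toNat ≠ j := by omega
        have hlen : i < m.length := by omega
        rw [hip, List.getElem?_set_self hlen]
        simp only [Option.getD_some]
        rw [List.getElem?_set_ne hjp]
      · rw [List.getElem?_set_ne hip]
    constructor
    · intro hmem
      rcases List.mem_cons.mp hmem with hmem | hmem
      · by_cases hmem' : ((i : Int), (j : Int)) ∈ ps
        · simpa using (ih m' hbm i j).1 hmem'
        · have hrest := (ih m' hbm i j).2 hmem'
          simp only [List.foldl_cons]
          rw [← hm', hrest]
          have h1 : p.1 = (i : Int) := by rw [← hmem]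
          have h2 : p.2 = (j : Int) := by rw [← hmem]
          rw [h1, h2] at hval_mp
          exact hval_mp
      · simpa using (ih m' hbm i j).1 hmem
    · intro hmem
      have h1 : ((i : Int), (j : Int)) ≠ p := fun hcon => hmem (by simp [hcon])
      have h2 : ((i : Int), (j : Int)) ∉ ps := fun hcon => hmem (by simp [hcon])
      have := (ih m' hbm i j).2 h2
      simp only [List.foldl_cons]
      rw [← hm', this, hval_ne i j h1]
-- walks along a row / a column
theorem pvWalk_row (g : List (List Int)) (r c1 c2 : Int)
    (hone : ∀ y, c1 ≤ y → y ≤ c2 → pvOne g (r, y)) :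
    ∀ c, c1 ≤ c → c ≤ c2 → pvReach g (r, c1) (r, c) := by
  intro c hc1
  induction c, hc1 using Int.le_induction with
  | base => intro _; exact Relation.ReflTransGen.refl
  | succ n hn ih =>
    intro hn1
    refine Relation.ReflTransGen.tail (ih (by omega)) ?_
    exact ⟨hone n hn (by omega), hone (n + 1) (by omega) hn1, by simp⟩

theorem pvWalk_col (g : List (List Int)) (c r1 r2 : Int)
    (hone : ∀ y, r1 ≤ y → y ≤ r2 → pvOne g (y, c)) :
    ∀ r, r1 ≤ r → r ≤ r2 → pvReach g (r1, c) (r, c) := by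
  intro r hr1
  induction r, hr1 using Int.le_induction with
  | base => intro _; exact Relation.ReflTransGen.refl
  | succ n hn ih =>
    intro hn1
    refine Relation.ReflTransGen.tail (ih (by omega)) ?_
    exact ⟨hone n hn (by omega), hone (n + 1) (by omega) hn1, by simp⟩

theorem pvBorder_reach_corner (g : List (List Int)) (r1 r2 c1 c2 : Int)
    (hgr : pvGoodRect g r1 r2 c1 c2) :
    ∀ p, pvBorderP r1 r2 c1 c2 p → pvReach g (r1, c1) p := by
  obtain ⟨hr12, hc12, hone, hclosed⟩ := hgr
  intro p hp
  obtain ⟨pa, pb⟩ := p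
  obtain ⟨hb1, hb2, hb3, hb4, hside⟩ := hp
  simp only at hb1 hb2 hb3 hb4 hside
  have htop : ∀ y, c1 ≤ y → y ≤ c2 → pvOne g (r1, y) := by
    intro y hy1 hy2
    exact hone (r1, y) ⟨le_refl _, by omega, hy1, hy2, by simp⟩
  have hbot : ∀ y, c1 ≤ y → y ≤ c2 → pvOne g (r2, y) := by
    intro y hy1 hy2
    exact hone (r2, y) ⟨by omega, le_refl _, hy1, hy2, by simp⟩
  have hleft : ∀ y, r1 ≤ y → y ≤ r2 → pvOne g (y, c1) := by
    intro y hy1 hy2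
    exact hone (y, c1) ⟨hy1, hy2, le_refl _, by omega, by simp⟩
  have hright : ∀ y, r1 ≤ y → y ≤ r2 → pvOne g (y, c2) := by
    intro y hy1 hy2
    exact hone (y, c2) ⟨hy1, hy2, by omega, le_refl _, by simp⟩
  rcases hside with hs | hs | hs | hs
  · subst hs
    exact pvWalk_row g pa c1 c2 htop pb hb3 hb4
  · subst hs
    exact pvReach_trans g (pvWalk_col g c1 r1 pa hleft pa (by omega) (le_refl _))
      (pvWalk_row g pa c1 c2 hbot pb hb3 hb4)
  · subst hs
    exact pvWalk_col g pb r1 r2 hleft pa hb1 hb2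
  · subst hs
    exact pvReach_trans g (pvWalk_row g r1 c1 pb htop pb (by omega) (le_refl _))
      (pvWalk_col g pb r1 r2 hright pa hb1 hb2)

-- for a good rectangle, the component of any border cell is exactly the border
theorem pvComp_eq_border (g : List (List Int)) (r1 r2 c1 c2 : Int)
    (hgr : pvGoodRect g r1 r2 c1 c2) (p : Int × Int) (hp : pvBorderP r1 r2 c1 c2 p) :
    ∀ q, pvReach g p q ↔ pvBorderP r1 r2 c1 c2 q := by
  intro q
  constructor
  · intro hre
    induction hre with
    | refl => exact hp
    | tail _ hadj ih => exact hgr.2.2.2 _ _ ih hadj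
  · intro hq
    exact pvReach_trans g (pvReach_symm g (pvBorder_reach_corner g r1 r2 c1 c2 hgr p hp))
      (pvBorder_reach_corner g r1 r2 c1 c2 hgr q hq)
-- generic membership through an accumulating fold
theorem pvMem_foldl_acc {α β : Type} (l : List β) (F : List α → β → List α)
    (Q : β → α → Prop) (hF : ∀ s y x, x ∈ F s y ↔ x ∈ s ∨ Q y x) :
    ∀ s x, x ∈ l.foldl F s ↔ x ∈ s ∨ ∃ y ∈ l, Q y x := by
  induction l with
  | nil => intro s x; simp
  | cons y l ih =>
    intro s x
    simp only [List.foldl_cons]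
    rw [ih (F s y) x, hF s y x]
    constructor
    · rintro ((hx | hq) | ⟨z, hz, hq⟩)
      · exact Or.inl hx
      · exact Or.inr ⟨y, by simp, hq⟩
      · exact Or.inr ⟨z, by simp [hz], hq⟩
    · rintro (hx | ⟨z, hz, hq⟩)
      · exact Or.inl (Or.inl hx)
      · rcases List.mem_cons.mp hz with hz | hz
        · subst hz; exact Or.inl (Or.inr hq)
        · exact Or.inr ⟨z, hz, hq⟩

theorem pvMem_borderA (minr maxr minc maxc : Int) (x : Int × Int) :
    x ∈ pvBorderA minr maxr minc maxc ↔ pvBorderP minr maxr minc maxc x := by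
  unfold pvBorderA
  rw [pvMem_foldl_acc _ _
    (fun r x => ∃ c, (minc ≤ c ∧ c < maxc + 1) ∧
      (r = minr ∨ r = maxr ∨ c = minc ∨ c = maxc) ∧ x = (r, c)) ?hFo]
  case hFo =>
    intro s r x
    rw [pvMem_foldl_acc _ _
      (fun c x => (r = minr ∨ r = maxr ∨ c = minc ∨ c = maxc) ∧ x = (r, c)) ?hFi]
    case hFi =>
      intro s c x
      split
      · rename_i hcond
        rw [PySem.Set.mem_add]
        constructor
        · rintro (hx | hx)
          · exact Or.inl hx
          · exact Or.inr ⟨hcond, hx⟩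
        · rintro (hx | ⟨_, hx⟩)
          · exact Or.inl hx
          · exact Or.inr hx
      · rename_i hcond
        constructor
        · exact Or.inl
        · rintro (hx | ⟨hc, _⟩)
          · exact hx
          · exact absurd hc hcond
    constructor
    · rintro (hx | ⟨c, hc, hq⟩)
      · exact Or.inl hx
      · have hc' := PySem.List.mem_pyRange_one.mp hc
        exact Or.inr ⟨c, ⟨hc'.1, hc'.2⟩, hq⟩
    · rintro (hx | ⟨c, hc, hq⟩)
      · exact Or.inl hx
      · exact Or.inr ⟨c, PySem.List.mem_pyRange_one.mpr (by omega), hq⟩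
  constructor
  · rintro (hx | ⟨r, hr, c, hc, hcond, hx⟩)
    · exact absurd hx (List.not_mem_nil)
    · subst hx
      have hr' := PySem.List.mem_pyRange_one.mp hr
      exact ⟨by omega, by omega, by omega, by omega, hcond⟩
  · rintro ⟨h1, h2, h3, h4, h5⟩
    refine Or.inr ⟨x.1, PySem.List.mem_pyRange_one.mpr (by omega), x.2, ⟨by omega, by omega⟩,
      h5, rfl⟩

theorem pvMem_borderB (r1 r2 c1 c2 : Int) (h12 : r1 ≤ r2) (hc12 : c1 ≤ c2) (x : Int × Int) :
    x ∈ pvBorderB r1 r2 c1 c2 ↔ pvBorderP r1 r2 c1 c2 x := by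
  unfold pvBorderB pvBorderP
  simp only [List.mem_append, List.mem_map, List.mem_flatMap, PySem.List.mem_pyRange_one,
    List.mem_cons, List.not_mem_nil, or_false]
  constructor
  · rintro ((⟨c, hc, hx⟩ | ⟨c, hc, hx⟩) | ⟨r, hr, hx | hx⟩) <;> subst hx
    · exact ⟨by omega, by omega, by omega, by omega, Or.inl rfl⟩
    · exact ⟨by omega, by omega, by omega, by omega, Or.inr (Or.inl rfl)⟩
    · exact ⟨by omega, by omega, by omega, by omega, Or.inr (Or.inr (Or.inl rfl))⟩
    · exact ⟨by omega, by omega, by omega, by omega, Or.inr (Or.inr (Or.inr rfl))⟩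
  · rintro ⟨h1, h2, h3, h4, h5⟩
    obtain ⟨xa, xb⟩ := x
    simp only at h1 h2 h3 h4 h5 ⊢
    rcases h5 with h5 | h5 | h5 | h5
    · exact Or.inl (Or.inl ⟨xb, by omega, by rw [h5]⟩)
    · exact Or.inl (Or.inr ⟨xb, by omega, by rw [h5]⟩)
    · by_cases hxa : xa = r1
      · exact Or.inl (Or.inl ⟨xb, by omega, by rw [hxa, h5]⟩)
      · by_cases hxa2 : xa = r2
        · exact Or.inl (Or.inr ⟨xb, by omega, by rw [hxa2, h5]⟩)
        · exact Or.inr ⟨xa, by omega, Or.inl (by rw [h5])⟩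
    · by_cases hxa : xa = r1
      · exact Or.inl (Or.inl ⟨xb, by omega, by rw [hxa, h5]⟩)
      · by_cases hxa2 : xa = r2
        · exact Or.inl (Or.inr ⟨xb, by omega, by rw [hxa2, h5]⟩)
        · exact Or.inr ⟨xa, by omega, Or.inr (by rw [h5])⟩

theorem pvMinMax (cl : List (Int × Int)) (r1 r2 c1 c2 : Int)
    (hmem : ∀ x, x ∈ cl ↔ pvBorderP r1 r2 c1 c2 x) (h12 : r1 ≤ r2) (hc12 : c1 ≤ c2) :
    ((cl.map (fun p => p.1)).min?).getD 0 = r1 ∧ ((cl.map (fun p => p.1)).max?).getD 0 = r2 ∧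
    ((cl.map (fun p => p.2)).min?).getD 0 = c1 ∧ ((cl.map (fun p => p.2)).max?).getD 0 = c2 := by
  have hc : (r1, c1) ∈ cl := (hmem _).mpr ⟨le_refl _, h12, le_refl _, hc12, by simp⟩
  have hc2' : (r2, c2) ∈ cl := (hmem _).mpr ⟨h12, le_refl _, hc12, le_refl _, by simp⟩
  refine ⟨?_, ?_, ?_, ?_⟩
  · rw [List.min?_eq_some_iff.mpr ⟨List.mem_map.mpr ⟨(r1, c1), hc, rfl⟩, ?_⟩]
    · rfl
    · rintro b hb
      obtain ⟨p, hp, hpb⟩ := List.mem_map.mp hb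
      have := (hmem p).mp hp
      subst hpb
      exact this.1
  · rw [List.max?_eq_some_iff.mpr ⟨List.mem_map.mpr ⟨(r2, c2), hc2', rfl⟩, ?_⟩]
    · rfl
    · rintro b hb
      obtain ⟨p, hp, hpb⟩ := List.mem_map.mp hb
      have := (hmem p).mp hp
      subst hpb
      exact this.2.1
  · rw [List.min?_eq_some_iff.mpr ⟨List.mem_map.mpr ⟨(r1, c1), hc, rfl⟩, ?_⟩]
    · rfl
    · rintro b hb
      obtain ⟨p, hp, hpb⟩ := List.mem_map.mp hb
      have := (hmem p).mp hp
      subst hpb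
      exact this.2.2.1
  · rw [List.max?_eq_some_iff.mpr ⟨List.mem_map.mpr ⟨(r2, c2), hc2', rfl⟩, ?_⟩]
    · rfl
    · rintro b hb
      obtain ⟨p, hp, hpb⟩ := List.mem_map.mp hb
      have := (hmem p).mp hp
      subst hpb
      exact this.2.2.2.1
-- the guard A's recolor loop applies to one component
def pvAGood (cells : PySem.Set (Int × Int)) : Prop :=
  ¬(((cells.map (fun p => p.1)).max?.getD 0) - ((cells.map (fun p => p.1)).min?.getD 0) < 2 ∨
    ((cells.map (fun p => p.2)).max?.getD 0) - ((cells.map (fun p => p.2)).min?.getD 0) < 2) ∧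
  PySem.Set.equal cells (pvBorderA ((cells.map (fun p => p.1)).min?.getD 0)
    ((cells.map (fun p => p.1)).max?.getD 0) ((cells.map (fun p => p.2)).min?.getD 0)
    ((cells.map (fun p => p.2)).max?.getD 0)) = true

theorem pvRecolorStep_eq (out : List (List Int)) (cl : PySem.Set (Int × Int)) :
    (pvAGood cl → pvRecolorStep out cl
      = cl.foldl (fun o p => o.set p.1.toNat ((o.getD p.1.toNat []).set p.2.toNat 3)) out) ∧
    (¬ pvAGood cl → pvRecolorStep out cl = out) := by
  unfold pvRecolorStep pvAGood
  dsimp only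
  split_ifs with h1 h2
  · exact ⟨fun hg => absurd h1 hg.1, fun _ => rfl⟩
  · exact ⟨fun _ => rfl, fun hg => absurd ⟨h1, h2⟩ hg⟩
  · exact ⟨fun hg => absurd hg.2 h2, fun _ => rfl⟩

theorem pvPre_row (g : List (List Int)) (hpre : Pre_solve_810b9b61 g) (r : Nat)
    (hr : r < g.length) : (g.getD 0 []).length ≤ (g.getD r []).length := by
  obtain ⟨hne, hrow⟩ := hpre
  have h0 : g.getD 0 [] = g.headD [] := by
    cases g with
    | nil => rfl
    | cons a l => rfl
  rw [h0]
  exact hrow _ (by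
    rw [List.getD_eq_getElem?_getD, List.getElem?_eq_getElem hr]
    exact List.getElem_mem hr)

theorem pvRecolor_char (g : List (List Int)) (hpre : Pre_solve_810b9b61 g) :
    ∀ (comps : List (PySem.Set (Int × Int))) (m : List (List Int)),
    (∀ cl ∈ comps, ∀ p ∈ cl, pvOne g p) →
    m.length = g.length → (∀ i : Nat, (m.getD i []).length = (g.getD i []).length) →
    (comps.foldl pvRecolorStep m).length = g.length ∧
    (∀ i : Nat, ((comps.foldl pvRecolorStep m).getD i []).length = (g.getD i []).length) ∧
    (∀ i j : Nat,
      ((∃ cl ∈ comps, pvAGood cl ∧ ((i : Int), (j : Int)) ∈ cl) →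
        pvAt (comps.foldl pvRecolorStep m) i j = 3) ∧
      ((¬ ∃ cl ∈ comps, pvAGood cl ∧ ((i : Int), (j : Int)) ∈ cl) →
        pvAt (comps.foldl pvRecolorStep m) i j = pvAt m i j)) := by
  intro comps
  induction comps with
  | nil =>
    intro m _ h1 h2
    exact ⟨h1, h2, fun i j => ⟨by simp, fun _ => rfl⟩⟩
  | cons cl rest ih =>
    intro m hone h1 h2
    have hrest1 : ∀ c ∈ rest, ∀ p ∈ c, pvOne g p := fun c hc => hone c (by simp [hc])
    by_cases hg : pvAGood cl
    · set m' := cl.foldl (fun o p => o.set p.1.toNat ((o.getD p.1.toNat []).set p.2.toNat 3)) m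
        with hm'
      have hstep : pvRecolorStep m cl = m' := (pvRecolorStep_eq m cl).1 hg
      have hb : ∀ p ∈ cl, 0 ≤ p.1 ∧ 0 ≤ p.2 ∧ p.1.toNat < m.length ∧
          p.2.toNat < (m.getD p.1.toNat []).length := by
        intro p hp
        have ho := hone cl (by simp) p hp
        obtain ⟨o1, o2, o3, o4, _⟩ := ho
        have hrows : (g.length : Int) = pvRows g := rfl
        refine ⟨o1, o3, by simp only [pvRows] at o2; omega, ?_⟩
        rw [h2 p.1.toNat]
        have hcols := pvPre_row g hpre p.1.toNat (by simp only [pvRows] at o2; omega)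
        simp only [pvCols] at o4
        omega
      have hsh := pvPaint_shape cl m
      have hm'1 : m'.length = g.length := by rw [hm', hsh.1, h1]
      have hm'2 : ∀ i : Nat, (m'.getD i []).length = (g.getD i []).length := by
        intro i; rw [hm', hsh.2 i, h2 i]
      have hrec := ih m' hrest1 hm'1 hm'2
      have hvals := pvPaint_val cl m hb
      refine ⟨by simpa [List.foldl_cons, hstep] using hrec.1,
        by simpa [List.foldl_cons, hstep] using hrec.2.1, ?_⟩
      intro i j
      simp only [List.foldl_cons, hstep]
      constructor
      · intro hex
        obtain ⟨c, hc, hcg, hcm⟩ := hex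
        rcases List.mem_cons.mp hc with hc | hc
        · subst hc
          by_cases htail : ∃ c ∈ rest, pvAGood c ∧ ((i : Int), (j : Int)) ∈ c
          · exact (hrec.2.2 i j).1 htail
          · rw [(hrec.2.2 i j).2 htail]
            exact ((hvals i j).1 hcm)
        · exact (hrec.2.2 i j).1 ⟨c, hc, hcg, hcm⟩
      · intro hnex
        have htail : ¬ ∃ c ∈ rest, pvAGood c ∧ ((i : Int), (j : Int)) ∈ c := by
          intro ⟨c, hc, hx⟩; exact hnex ⟨c, by simp [hc], hx⟩
        have hhead : ((i : Int), (j : Int)) ∉ cl := by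
          intro hx; exact hnex ⟨cl, by simp, hg, hx⟩
        rw [(hrec.2.2 i j).2 htail]
        exact (hvals i j).2 hhead
    · have hstep : pvRecolorStep m cl = m := (pvRecolorStep_eq m cl).2 hg
      have hrec := ih m hrest1 h1 h2
      refine ⟨by simpa [List.foldl_cons, hstep] using hrec.1,
        by simpa [List.foldl_cons, hstep] using hrec.2.1, ?_⟩
      intro i j
      simp only [List.foldl_cons, hstep]
      constructor
      · intro hex
        obtain ⟨c, hc, hcg, hcm⟩ := hex
        rcases List.mem_cons.mp hc with hc | hc
        · subst hc; exact absurd hcg hg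
        · exact (hrec.2.2 i j).1 ⟨c, hc, hcg, hcm⟩
      · intro hnex
        refine (hrec.2.2 i j).2 ?_
        intro ⟨c, hc, hx⟩; exact hnex ⟨c, by simp [hc], hx⟩
theorem pvAdj_of_dir (g : List (List Int)) (p d : Int × Int) (hd : d ∈ pvDirsB)
    (hp : pvOne g p) (hq : pvOne g (p.1 + d.1, p.2 + d.2)) :
    pvAdj g p (p.1 + d.1, p.2 + d.2) := by
  refine ⟨hp, hq, ?_⟩
  simp only [pvDirsB, List.mem_cons, List.not_mem_nil, or_false] at hd
  rcases hd with h | h | h | h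
  · subst h; simp; omega
  · subst h; simp
  · subst h; simp; omega
  · subst h; simp

theorem pvOnBorder_iff (r1 r2 c1 c2 : Int) (q : Int × Int) :
    pvOnBorder r1 r2 c1 c2 q.1 q.2 = true ↔ pvBorderP r1 r2 c1 c2 q := by
  simp [pvOnBorder, pvBorderP]

theorem pvGoodB_iff (g : List (List Int)) (r1 r2 c1 c2 : Int)
    (hb1 : 0 ≤ r1) (hb2 : r1 + 2 ≤ r2) (hb3 : r2 < pvRows g)
    (hb4 : 0 ≤ c1) (hb5 : c1 + 2 ≤ c2) (hb6 : c2 < pvCols g) :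
    pvGoodB g (pvRows g) (pvCols g) r1 r2 c1 c2 = true ↔ pvGoodRect g r1 r2 c1 c2 := by
  unfold pvGoodB
  rw [List.all_eq_true]
  constructor
  · intro hall
    have hone : ∀ p, pvBorderP r1 r2 c1 c2 p → pvOne g p := by
      intro p hbp
      have hmem := (pvMem_borderB r1 r2 c1 c2 (by omega) (by omega) p).mpr hbp
      have := hall p hmem
      rw [Bool.and_eq_true] at this
      obtain ⟨hval, _⟩ := this
      rw [decide_eq_true_iff] at hval
      obtain ⟨k1, k2, k3, k4, _⟩ := hbp
      exact ⟨by omega, by omega, by omega, by omega, hval⟩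
    refine ⟨by omega, by omega, hone, ?_⟩
    intro p q hbp hadj
    have hmem := (pvMem_borderB r1 r2 c1 c2 (by omega) (by omega) p).mpr hbp
    have := hall p hmem
    rw [Bool.and_eq_true] at this
    obtain ⟨_, hdirs⟩ := this
    rw [List.all_eq_true] at hdirs
    obtain ⟨d, hd, hqd⟩ := pvAdj_dir g hadj
    have hstep := hdirs d hd
    rw [hqd]
    have honeq : pvOne g (p.1 + d.1, p.2 + d.2) := by rw [← hqd]; exact hadj.2.1
    obtain ⟨k1, k2, k3, k4, k5⟩ := honeq
    simp only [Bool.not_eq_true', Bool.and_eq_false_iff, decide_eq_false_iff_not] at hstep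
    rcases hstep with h | h
    · exact absurd ⟨k1, k2, k3, k4, k5⟩ h
    · exact (pvOnBorder_iff r1 r2 c1 c2 (p.1 + d.1, p.2 + d.2)).mp (by simpa using h)
  · rintro ⟨_, _, hone, hclosed⟩
    intro p hmem
    have hbp := (pvMem_borderB r1 r2 c1 c2 (by omega) (by omega) p).mp hmem
    rw [Bool.and_eq_true]
    refine ⟨decide_eq_true_iff.mpr (hone p hbp).2.2.2.2, ?_⟩
    rw [List.all_eq_true]
    intro d hd
    simp only [Bool.not_eq_true', Bool.and_eq_false_iff, decide_eq_false_iff_not]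
    by_cases hq : 0 ≤ p.1 + d.1 ∧ p.1 + d.1 < pvRows g ∧ 0 ≤ p.2 + d.2 ∧ p.2 + d.2 < pvCols g ∧
        pvAt g (p.1 + d.1) (p.2 + d.2) = 1
    · refine Or.inr ?_
      have honeq : pvOne g (p.1 + d.1, p.2 + d.2) :=
        ⟨hq.1, hq.2.1, hq.2.2.1, hq.2.2.2.1, hq.2.2.2.2⟩
      have hadj := pvAdj_of_dir g p d hd (hone p hbp) honeq
      have := (pvOnBorder_iff r1 r2 c1 c2 (p.1 + d.1, p.2 + d.2)).mpr
        (hclosed p _ hbp hadj)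
      simpa using this
    · exact Or.inl hq

theorem pvMem_rects (rows cols : Int) (t : Int × Int × Int × Int) :
    t ∈ (PySem.List.pyRange 0 rows 1).flatMap (fun r1 =>
      (PySem.List.pyRange (r1 + 2) rows 1).flatMap (fun r2 =>
        (PySem.List.pyRange 0 cols 1).flatMap (fun c1 =>
          (PySem.List.pyRange (c1 + 2) cols 1).map (fun c2 => (r1, r2, c1, c2))))) ↔
    (0 ≤ t.1 ∧ t.1 + 2 ≤ t.2.1 ∧ t.2.1 < rows ∧
      0 ≤ t.2.2.1 ∧ t.2.2.1 + 2 ≤ t.2.2.2 ∧ t.2.2.2 < cols) := by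
  simp only [List.mem_flatMap, List.mem_map, PySem.List.mem_pyRange_one]
  constructor
  · rintro ⟨r1, hr1, r2, hr2, c1, hc1, c2, hc2, ht⟩
    subst ht
    simp only
    omega
  · rintro ⟨h1, h2, h3, h4, h5, h6⟩
    exact ⟨t.1, by omega, t.2.1, by omega, t.2.2.1, by omega, t.2.2.2, by omega, rfl⟩

theorem pvAltFold_char (g : List (List Int)) (hpre : Pre_solve_810b9b61 g) :
    ∀ (rl : List (Int × Int × Int × Int)) (m : List (List Int)),
    (∀ t ∈ rl, 0 ≤ t.1 ∧ t.1 + 2 ≤ t.2.1 ∧ t.2.1 < pvRows g ∧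
      0 ≤ t.2.2.1 ∧ t.2.2.1 + 2 ≤ t.2.2.2 ∧ t.2.2.2 < pvCols g) →
    m.length = g.length → (∀ i : Nat, (m.getD i []).length = (g.getD i []).length) →
    ((rl.foldl (fun out t =>
        if pvGoodB g (pvRows g) (pvCols g) t.1 t.2.1 t.2.2.1 t.2.2.2 then
          (pvBorderB t.1 t.2.1 t.2.2.1 t.2.2.2).foldl
            (fun o p => o.set p.1.toNat ((o.getD p.1.toNat []).set p.2.toNat 3)) out
        else out) m).length = g.length) ∧
    (∀ i : Nat, ((rl.foldl (fun out t =>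
        if pvGoodB g (pvRows g) (pvCols g) t.1 t.2.1 t.2.2.1 t.2.2.2 then
          (pvBorderB t.1 t.2.1 t.2.2.1 t.2.2.2).foldl
            (fun o p => o.set p.1.toNat ((o.getD p.1.toNat []).set p.2.toNat 3)) out
        else out) m).getD i []).length = (g.getD i []).length) ∧
    (∀ i j : Nat,
      ((∃ t ∈ rl, pvGoodB g (pvRows g) (pvCols g) t.1 t.2.1 t.2.2.1 t.2.2.2 = true ∧
        ((i : Int), (j : Int)) ∈ pvBorderB t.1 t.2.1 t.2.2.1 t.2.2.2) →
        pvAt (rl.foldl (fun out t =>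
          if pvGoodB g (pvRows g) (pvCols g) t.1 t.2.1 t.2.2.1 t.2.2.2 then
            (pvBorderB t.1 t.2.1 t.2.2.1 t.2.2.2).foldl
              (fun o p => o.set p.1.toNat ((o.getD p.1.toNat []).set p.2.toNat 3)) out
          else out) m) i j = 3) ∧
      ((¬ ∃ t ∈ rl, pvGoodB g (pvRows g) (pvCols g) t.1 t.2.1 t.2.2.1 t.2.2.2 = true ∧
        ((i : Int), (j : Int)) ∈ pvBorderB t.1 t.2.1 t.2.2.1 t.2.2.2) →
        pvAt (rl.foldl (fun out t =>
          if pvGoodB g (pvRows g) (pvCols g) t.1 t.2.1 t.2.2.1 t.2.2.2 then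
            (pvBorderB t.1 t.2.1 t.2.2.1 t.2.2.2).foldl
              (fun o p => o.set p.1.toNat ((o.getD p.1.toNat []).set p.2.toNat 3)) out
          else out) m) i j = pvAt m i j)) := by
  intro rl
  induction rl with
  | nil =>
    intro m _ h1 h2
    exact ⟨h1, h2, fun i j => ⟨by simp, fun _ => rfl⟩⟩
  | cons t rest ih =>
    intro m hbt h1 h2
    have hrest : ∀ t' ∈ rest, _ := fun t' ht' => hbt t' (by simp [ht'])
    have hbthis := hbt t (by simp)
    by_cases hg : pvGoodB g (pvRows g) (pvCols g) t.1 t.2.1 t.2.2.1 t.2.2.2 = true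
    · have hb : ∀ p ∈ pvBorderB t.1 t.2.1 t.2.2.1 t.2.2.2, 0 ≤ p.1 ∧ 0 ≤ p.2 ∧ p.1.toNat < m.length ∧
          p.2.toNat < (m.getD p.1.toNat []).length := by
        intro p hp
        have hbp := (pvMem_borderB t.1 t.2.1 t.2.2.1 t.2.2.2 (by omega) (by omega) p).mp hp
        obtain ⟨k1, k2, k3, k4, _⟩ := hbp
        have hr : p.1 < pvRows g := by omega
        have hcq : p.2 < pvCols g := by omega
        simp only [pvRows] at hr
        simp only [pvCols] at hcq
        refine ⟨by omega, by omega, by omega, ?_⟩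
        rw [h2 p.1.toNat]
        have := pvPre_row g hpre p.1.toNat (by omega)
        omega
      have hsh := pvPaint_shape (pvBorderB t.1 t.2.1 t.2.2.1 t.2.2.2) m
      have hm'1 : ((pvBorderB t.1 t.2.1 t.2.2.1 t.2.2.2).foldl
          (fun o p => o.set p.1.toNat ((o.getD p.1.toNat []).set p.2.toNat 3)) m).length
          = g.length := by rw [hsh.1, h1]
      have hm'2 : ∀ i : Nat, (((pvBorderB t.1 t.2.1 t.2.2.1 t.2.2.2).foldl
          (fun o p => o.set p.1.toNat ((o.getD p.1.toNat []).set p.2.toNat 3)) m).getD i []).length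
          = (g.getD i []).length := by
        intro i; rw [hsh.2 i, h2 i]
      have hrec := ih ((pvBorderB t.1 t.2.1 t.2.2.1 t.2.2.2).foldl
        (fun o p => o.set p.1.toNat ((o.getD p.1.toNat []).set p.2.toNat 3)) m) hrest hm'1 hm'2
      have hvals := pvPaint_val (pvBorderB t.1 t.2.1 t.2.2.1 t.2.2.2) m hb
      refine ⟨by simp only [List.foldl_cons, if_pos hg]; exact hrec.1,
        by simp only [List.foldl_cons, if_pos hg]; exact hrec.2.1, ?_⟩
      intro i j
      simp only [List.foldl_cons, if_pos hg]
      constructor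
      · intro hex
        obtain ⟨t', ht', htg, htm⟩ := hex
        rcases List.mem_cons.mp ht' with ht' | ht'
        · subst ht'
          by_cases htail : ∃ t' ∈ rest, pvGoodB g (pvRows g) (pvCols g) t'.1 t'.2.1 t'.2.2.1 t'.2.2.2 = true ∧
              ((i : Int), (j : Int)) ∈ pvBorderB t'.1 t'.2.1 t'.2.2.1 t'.2.2.2
          · exact (hrec.2.2 i j).1 htail
          · rw [(hrec.2.2 i j).2 htail]
            exact (hvals i j).1 htm
        · exact (hrec.2.2 i j).1 ⟨t', ht', htg, htm⟩
      · intro hnex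
        have htail : ¬ ∃ t' ∈ rest, pvGoodB g (pvRows g) (pvCols g) t'.1 t'.2.1 t'.2.2.1 t'.2.2.2 = true ∧
            ((i : Int), (j : Int)) ∈ pvBorderB t'.1 t'.2.1 t'.2.2.1 t'.2.2.2 := by
          intro ⟨t', ht', hx⟩; exact hnex ⟨t', by simp [ht'], hx⟩
        have hhead : ((i : Int), (j : Int)) ∉ pvBorderB t.1 t.2.1 t.2.2.1 t.2.2.2 := by
          intro hx; exact hnex ⟨t, by simp, hg, hx⟩
        rw [(hrec.2.2 i j).2 htail]
        exact (hvals i j).2 hhead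
    · have hstep : (if pvGoodB g (pvRows g) (pvCols g) t.1 t.2.1 t.2.2.1 t.2.2.2 = true then
          (pvBorderB t.1 t.2.1 t.2.2.1 t.2.2.2).foldl
            (fun o p => o.set p.1.toNat ((o.getD p.1.toNat []).set p.2.toNat 3)) m
        else m) = m := by rw [if_neg hg]
      have hrec := ih m hrest h1 h2
      refine ⟨by simp only [List.foldl_cons, hstep]; exact hrec.1,
        by simp only [List.foldl_cons, hstep]; exact hrec.2.1, ?_⟩
      intro i j
      simp only [List.foldl_cons, hstep]
      constructor
      · intro hex
        obtain ⟨t', ht', htg, htm⟩ := hex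
        rcases List.mem_cons.mp ht' with ht' | ht'
        · subst ht'; exact absurd htg hg
        · exact (hrec.2.2 i j).1 ⟨t', ht', htg, htm⟩
      · intro hnex
        refine (hrec.2.2 i j).2 ?_
        intro ⟨t', ht', hx⟩; exact hnex ⟨t', by simp [ht'], hx⟩

theorem pvAGood_iff (g : List (List Int)) (cl : PySem.Set (Int × Int)) (s : Int × Int)
    (hone : pvOne g s) (hchar : ∀ p, p ∈ cl ↔ pvReach g s p) :
    pvAGood cl ↔ ∃ r1 r2 c1 c2, pvGoodRect g r1 r2 c1 c2 ∧
      (∀ p, p ∈ cl ↔ pvBorderP r1 r2 c1 c2 p) := by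
  constructor
  · rintro ⟨hguard, hequal⟩
    rcases not_or.mp hguard with ⟨hgu1, hgu2⟩
    set minr := (cl.map (fun p => p.1)).min?.getD 0 with hminr
    set maxr := (cl.map (fun p => p.1)).max?.getD 0 with hmaxr
    set minc := (cl.map (fun p => p.2)).min?.getD 0 with hminc
    set maxc := (cl.map (fun p => p.2)).max?.getD 0 with hmaxc
    have hmem : ∀ p, p ∈ cl ↔ pvBorderP minr maxr minc maxc p := by
      intro p
      rw [← pvMem_borderA minr maxr minc maxc p]
      exact (PySem.Set.equal_iff cl _).mp hequal p
    refine ⟨minr, maxr, minc, maxc, ⟨by omega, by omega, ?_, ?_⟩, hmem⟩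
    · intro p hbp
      exact pvReach_one g hone ((hchar p).mp ((hmem p).mpr hbp))
    · intro p q hbp hadj
      have hp : p ∈ cl := (hmem p).mpr hbp
      have hq : q ∈ cl := (hchar q).mpr (Relation.ReflTransGen.tail ((hchar p).mp hp) hadj)
      exact (hmem q).mp hq
  · rintro ⟨r1, r2, c1, c2, hgr, hmem⟩
    have hg1 := hgr.1
    have hg2 := hgr.2.1
    have hmm := pvMinMax cl r1 r2 c1 c2 hmem (by omega) (by omega)
    unfold pvAGood
    rw [hmm.1, hmm.2.1, hmm.2.2.1, hmm.2.2.2]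
    refine ⟨by omega, ?_⟩
    rw [PySem.Set.equal_iff cl _]
    intro x
    rw [pvMem_borderA r1 r2 c1 c2 x]
    exact hmem x
theorem pvAt_getElem (m : List (List Int)) (i j : Nat) (hi : i < m.length)
    (hj : j < m[i].length) : m[i][j] = pvAt ((m : List (List Int))) (i : Int) (j : Int) := by
  unfold pvAt
  simp only [Int.toNat_natCast]
  have h1 : m.getD i [] = m[i] := by
    rw [List.getD_eq_getElem?_getD, List.getElem?_eq_getElem hi]
    rfl
  rw [h1]
  rw [List.getD_eq_getElem?_getD, List.getElem?_eq_getElem hj]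
  rfl

theorem solve_810b9b61_main (grid : List (List Int)) (hpre : Pre_solve_810b9b61 grid) :
    solve_810b9b61 grid = solve_810b9b61_alt grid := by
  -- names for the two intermediate lists
  have hsolveA : solve_810b9b61 grid =
      (((PySem.List.pyRange 0 (pvRows grid) 1).flatMap (fun r =>
        (PySem.List.pyRange 0 (pvCols grid) 1).map (fun c => (r, c)))).foldl
        (pvScanStep grid (pvRows grid) (pvCols grid)) ((fun _ => false), [])).2.foldl
        pvRecolorStep grid := rfl
  have hsolveB : solve_810b9b61_alt grid =
      ((PySem.List.pyRange 0 (pvRows grid) 1).flatMap (fun r1 =>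
        (PySem.List.pyRange (r1 + 2) (pvRows grid) 1).flatMap (fun r2 =>
          (PySem.List.pyRange 0 (pvCols grid) 1).flatMap (fun c1 =>
            (PySem.List.pyRange (c1 + 2) (pvCols grid) 1).map (fun c2 => (r1, r2, c1, c2)))))).foldl
        (fun out t =>
          if pvGoodB grid (pvRows grid) (pvCols grid) t.1 t.2.1 t.2.2.1 t.2.2.2 then
            (pvBorderB t.1 t.2.1 t.2.2.1 t.2.2.2).foldl
              (fun o p => o.set p.1.toNat ((o.getD p.1.toNat []).set p.2.toNat 3)) out
          else out) grid := rfl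
  -- scan analysis
  have hscan := pvScan_fold grid (pvRows grid) (pvCols grid) rfl rfl
    ((PySem.List.pyRange 0 (pvRows grid) 1).flatMap (fun r =>
      (PySem.List.pyRange 0 (pvCols grid) 1).map (fun c => (r, c))))
    (fun p hp => (pvMem_allCells (pvRows grid) (pvCols grid) p).mp hp)
    ((fun _ => false), []) ⟨by simp, by simp⟩
  set comps := (((PySem.List.pyRange 0 (pvRows grid) 1).flatMap (fun r =>
    (PySem.List.pyRange 0 (pvCols grid) 1).map (fun c => (r, c)))).foldl
    (pvScanStep grid (pvRows grid) (pvCols grid)) ((fun _ => false), [])) with hcomps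
  have hC1 : ∀ cl ∈ comps.2, ∃ s, pvOne grid s ∧ ∀ p, p ∈ cl ↔ pvReach grid s p :=
    hscan.1.1
  have hC2 : ∀ q, pvOne grid q → ∃ cl ∈ comps.2, q ∈ cl := by
    intro q hq
    have hmem : q ∈ (PySem.List.pyRange 0 (pvRows grid) 1).flatMap (fun r =>
        (PySem.List.pyRange 0 (pvCols grid) 1).map (fun c => (r, c))) :=
      (pvMem_allCells (pvRows grid) (pvCols grid) q).mpr ⟨hq.1, hq.2.1, hq.2.2.1, hq.2.2.2.1⟩
    exact (hscan.1.2 q).mp (hscan.2.2 q hmem hq)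
  have hOneAll : ∀ cl ∈ comps.2, ∀ p ∈ cl, pvOne grid p := by
    intro cl hcl p hp
    obtain ⟨s, hs, hchar⟩ := hC1 cl hcl
    exact pvReach_one grid hs ((hchar p).mp hp)
  -- the two pointwise characterizations
  have hA := pvRecolor_char grid hpre comps.2 grid hOneAll rfl (fun _ => rfl)
  have hB := pvAltFold_char grid hpre
    ((PySem.List.pyRange 0 (pvRows grid) 1).flatMap (fun r1 =>
      (PySem.List.pyRange (r1 + 2) (pvRows grid) 1).flatMap (fun r2 =>
        (PySem.List.pyRange 0 (pvCols grid) 1).flatMap (fun c1 =>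
          (PySem.List.pyRange (c1 + 2) (pvCols grid) 1).map (fun c2 => (r1, r2, c1, c2))))))
    grid (fun t ht => (pvMem_rects (pvRows grid) (pvCols grid) t).mp ht) rfl (fun _ => rfl)
  -- both mark conditions are pvMark
  have hSA : ∀ i j : Nat, (∃ cl ∈ comps.2, pvAGood cl ∧ ((i : Int), (j : Int)) ∈ cl) ↔
      pvMark grid ((i : Int), (j : Int)) := by
    intro i j
    constructor
    · rintro ⟨cl, hcl, hgood, hxin⟩
      obtain ⟨s, hs, hchar⟩ := hC1 cl hcl
      obtain ⟨r1, r2, c1, c2, hgr, hmem⟩ := (pvAGood_iff grid cl s hs hchar).mp hgood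
      exact ⟨r1, r2, c1, c2, hgr, (hmem _).mp hxin⟩
    · rintro ⟨r1, r2, c1, c2, hgr, hbx⟩
      have hxone : pvOne grid ((i : Int), (j : Int)) := hgr.2.2.1 _ hbx
      obtain ⟨cl, hcl, hxcl⟩ := hC2 _ hxone
      obtain ⟨s, hs, hchar⟩ := hC1 cl hcl
      have hsx : pvReach grid s ((i : Int), (j : Int)) := (hchar _).mp hxcl
      have hmem : ∀ p, p ∈ cl ↔ pvBorderP r1 r2 c1 c2 p := by
        intro p
        rw [hchar p]
        constructor
        · intro hsp
          exact (pvComp_eq_border grid r1 r2 c1 c2 hgr _ hbx p).mp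
            (pvReach_trans grid (pvReach_symm grid hsx) hsp)
        · intro hbp
          exact pvReach_trans grid hsx
            ((pvComp_eq_border grid r1 r2 c1 c2 hgr _ hbx p).mpr hbp)
      exact ⟨cl, hcl, (pvAGood_iff grid cl s hs hchar).mpr ⟨r1, r2, c1, c2, hgr, hmem⟩, hxcl⟩
  have hSB : ∀ i j : Nat, (∃ t ∈ (PySem.List.pyRange 0 (pvRows grid) 1).flatMap (fun r1 =>
      (PySem.List.pyRange (r1 + 2) (pvRows grid) 1).flatMap (fun r2 =>
        (PySem.List.pyRange 0 (pvCols grid) 1).flatMap (fun c1 =>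
          (PySem.List.pyRange (c1 + 2) (pvCols grid) 1).map (fun c2 => (r1, r2, c1, c2))))),
      pvGoodB grid (pvRows grid) (pvCols grid) t.1 t.2.1 t.2.2.1 t.2.2.2 = true ∧
      ((i : Int), (j : Int)) ∈ pvBorderB t.1 t.2.1 t.2.2.1 t.2.2.2) ↔
      pvMark grid ((i : Int), (j : Int)) := by
    intro i j
    constructor
    · rintro ⟨t, ht, htg, htm⟩
      obtain ⟨k1, k2, k3, k4, k5, k6⟩ := (pvMem_rects (pvRows grid) (pvCols grid) t).mp ht
      have hgr := (pvGoodB_iff grid t.1 t.2.1 t.2.2.1 t.2.2.2 k1 k2 k3 k4 k5 k6).mp htg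
      exact ⟨t.1, t.2.1, t.2.2.1, t.2.2.2, hgr,
        (pvMem_borderB t.1 t.2.1 t.2.2.1 t.2.2.2 (by omega) (by omega) _).mp htm⟩
    · rintro ⟨r1, r2, c1, c2, hgr, hbx⟩
      have hco1 : pvOne grid (r1, c1) :=
        hgr.2.2.1 (r1, c1) ⟨le_refl _, by have := hgr.1; omega, le_refl _,
          by have := hgr.2.1; omega, by simp⟩
      have hco2 : pvOne grid (r2, c2) :=
        hgr.2.2.1 (r2, c2) ⟨by have := hgr.1; omega, le_refl _,
          by have := hgr.2.1; omega, le_refl _, by simp⟩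
      have hg1 := hgr.1
      have hg2 := hgr.2.1
      obtain ⟨o1, o2, o3, o4, _⟩ := hco1
      obtain ⟨p1, p2, p3, p4, _⟩ := hco2
      refine ⟨(r1, r2, c1, c2), (pvMem_rects (pvRows grid) (pvCols grid) _).mpr
        (show (0:Int) ≤ r1 ∧ r1 + 2 ≤ r2 ∧ r2 < pvRows grid ∧ (0:Int) ≤ c1 ∧ c1 + 2 ≤ c2 ∧
          c2 < pvCols grid by omega), ?_, ?_⟩
      · exact (pvGoodB_iff grid r1 r2 c1 c2 (by omega) (by omega) (by omega) (by omega)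
          (by omega) (by omega)).mpr hgr
      · exact (pvMem_borderB r1 r2 c1 c2 (by omega) (by omega) _).mpr hbx
  -- assemble: both sides have grid's shape and the same pointwise values
  rw [hsolveA, hsolveB]
  apply List.ext_getElem
  · rw [hA.1, hB.1]
  · intro i hi1 hi2
    apply List.ext_getElem
    · have e1 : ((comps.2.foldl pvRecolorStep grid)[i]).length
          = ((comps.2.foldl pvRecolorStep grid).getD i []).length := by
        rw [List.getD_eq_getElem?_getD, List.getElem?_eq_getElem hi1]
        rfl
      have e2 := hA.2.1 i
      have e3 := hB.2.1 i
      rw [e1, e2, ← e3, List.getD_eq_getElem?_getD, List.getElem?_eq_getElem hi2]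
      rfl
    · intro j hj1 hj2
      have hv1 := pvAt_getElem _ i j hi1 hj1
      have hv2 := pvAt_getElem _ i j hi2 hj2
      rw [hv1, hv2]
      by_cases hmark : pvMark grid ((i : Int), (j : Int))
      · rw [(hA.2.2 i j).1 ((hSA i j).mpr hmark), ((hB.2.2 i j).1 ((hSB i j).mpr hmark))]
      · rw [(hA.2.2 i j).2 (fun hex => hmark ((hSA i j).mp hex)),
          (hB.2.2 i j).2 (fun hex => hmark ((hSB i j).mp hex))]

-- ===== VERDICT (by name: the statement is the Claim_ definition above) =====
theorem solve_810b9b61_spec : Claim_equal_solve_810b9b61 := by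
  intro grid _ hpre
  unfold Spec_solve_810b9b61
  exact solve_810b9b61_main grid hpre
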